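-- pv_equiv track=rewrite | github.com/jack7141/Coding-Test | 프로그래머스/코테준비/must_2.py | countPerms
-- ===== SOURCE A (Python) =====
-- MOD = 10 ** 9 + 7
--
-- def countPerms(n):
--     dp_a, dp_e, dp_i, dp_o, dp_u = 1, 1, 1, 1, 1
--
--     for _ in range(2, n + 1):
--         new_a = (dp_e + dp_i + dp_u) % MOD
--         new_e = (dp_a + dp_i) % MOD
--         new_i = (dp_e + dp_o) % MOD
--         new_o = dp_i % MOD
--         new_u = (dp_i + dp_o) % MOD
--
--         dp_a, dp_e, dp_i, dp_o, dp_u = new_a, new_e, new_i, new_o, new_u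
--
--     return (dp_a + dp_e + dp_i + dp_o + dp_u) % MOD
-- ===== SOURCE B (Python) =====
-- MOD = 10 ** 9 + 7
--
-- # Transition matrix: next vector = T . current, rows = (a, e, i, o, u)
-- _T = [[0, 1, 1, 0, 1],
--       [1, 0, 1, 0, 0],
--       [0, 1, 0, 1, 0],
--       [0, 0, 1, 0, 0],
--       [0, 0, 1, 1, 0]]
--
-- def _mul(A, B):
--     return [[sum(A[i][k] * B[k][j] for k in range(5)) % MOD for j in range(5)]
--             for i in range(5)]
--
-- def _mpow(k):
--     if k == 0:
--         return [[1 if i == j else 0 for j in range(5)] for i in range(5)]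
--     H = _mpow(k // 2)
--     S = _mul(H, H)
--     return _mul(S, _T) if k % 2 == 1 else S
--
-- def countPerms(n):
--     P = _mpow(max(n - 1, 0))
--     return sum(P[i][j] for i in range(5) for j in range(5)) % MOD
-- ===== Notes on version B (the rewrite author's own statement) =====
-- stated objective: faster
-- what changed: replaces the O(n) dp loop over the five vowel states with binary exponentiation of the 5x5 transition matrix mod 1e9+7 and sums all entries of T^(n-1)
import Mathlib
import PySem

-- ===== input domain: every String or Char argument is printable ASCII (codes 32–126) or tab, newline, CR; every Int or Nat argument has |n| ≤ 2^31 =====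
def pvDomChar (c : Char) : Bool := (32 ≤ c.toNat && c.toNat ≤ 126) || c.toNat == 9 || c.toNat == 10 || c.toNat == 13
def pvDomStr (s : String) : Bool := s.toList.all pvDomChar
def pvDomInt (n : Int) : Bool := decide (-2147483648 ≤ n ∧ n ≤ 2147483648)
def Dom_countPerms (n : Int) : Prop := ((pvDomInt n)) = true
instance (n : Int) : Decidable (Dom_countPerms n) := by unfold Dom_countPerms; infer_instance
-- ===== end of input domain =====

-- B replaces A's O(n) five-state dp loop by binary exponentiation of the 5x5
-- transition matrix mod 10^9+7 (asymptotically faster, O(log n) matrix multiplications).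

-- ===== PORT A =====
def pvMOD : Int := 10 ^ 9 + 7

-- one iteration of A's loop body on the state (dp_a, dp_e, dp_i, dp_o, dp_u)
def pvStep (s : Int × Int × Int × Int × Int) : Int × Int × Int × Int × Int :=
  match s with
  | (a, e, i, o, u) =>
    (PySem.Int.mod (e + i + u) pvMOD, PySem.Int.mod (a + i) pvMOD,
     PySem.Int.mod (e + o) pvMOD, PySem.Int.mod i pvMOD, PySem.Int.mod (i + o) pvMOD)

def countPerms (n : Int) : Int :=
  match (PySem.List.pyRange 2 (n + 1) 1).foldl (fun s _ => pvStep s) (1, 1, 1, 1, 1) with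
  | (a, e, i, o, u) => PySem.Int.mod (a + e + i + o + u) pvMOD

-- ===== PORT B =====
-- the transition matrix _T of Source B
def pvRows : List (List Int) :=
  [[0, 1, 1, 0, 1], [1, 0, 1, 0, 0], [0, 1, 0, 1, 0], [0, 0, 1, 0, 0], [0, 0, 1, 1, 0]]

-- A[i][j] (indices are always in range 0..4 here, so getD is exact)
def pvEntry (A : List (List Int)) (i j : Nat) : Int := (A.getD i []).getD j 0

-- _mul of Source B: entrywise sum-of-products reduced mod MOD
def pvMul (A B : List (List Int)) : List (List Int) :=
  (List.range 5).map fun i => (List.range 5).map fun j =>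
    PySem.Int.mod (((List.range 5).map fun k => pvEntry A i k * pvEntry B k j).sum) pvMOD

-- the k = 0 identity matrix of _mpow
def pvId : List (List Int) :=
  (List.range 5).map fun i => (List.range 5).map fun j => if i = j then (1 : Int) else 0

-- body of _mpow after the recursive call (kept separate so H is evaluated once)
def pvMpowStep (H : List (List Int)) (odd : Bool) : List (List Int) :=
  let S := pvMul H H
  if odd then pvMul S pvRows else S

-- _mpow of Source B: binary exponentiation (k // 2 squaring, extra factor if k odd)
def pvMpow : Nat → List (List Int)
  | 0 => pvId
  | (k + 1) => pvMpowStep (pvMpow ((k + 1) / 2)) ((k + 1) % 2 == 1)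
termination_by k => k
decreasing_by omega

-- max(n-1, 0) is (n-1).toNat
def countPerms_alt (n : Int) : Int :=
  let P := pvMpow (n - 1).toNat
  PySem.Int.mod (((List.range 5).map fun i =>
    ((List.range 5).map fun j => pvEntry P i j).sum).sum) pvMOD

-- ===== PRECONDITION & SPEC =====
def Spec_countPerms (n : Int) (out : Int) : Prop := out = countPerms_alt n
instance (n : Int) (out : Int) : Decidable (Spec_countPerms n out) := by unfold Spec_countPerms; infer_instance

-- ===== CLAIM (what is proved, stated in full; the proofs are below) =====
def Claim_equal_countPerms : Prop := ∀ (n : Int), Dom_countPerms n → Spec_countPerms n (countPerms n)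

-- ===== LEMMAS AND PROOFS =====
def pvN : Nat := 10 ^ 9 + 7

-- entry access with Fin indices
def pvEntryF (A : List (List Int)) (i j : Fin 5) : Int := pvEntry A i.val j.val

-- exact transition matrix over ZMod pvN
def pvMz : Matrix (Fin 5) (Fin 5) (ZMod pvN) := Matrix.of fun i j => ((pvEntryF pvRows i j : Int) : ZMod pvN)

lemma pv_cast_mod (x : Int) : ((PySem.Int.mod x pvMOD : Int) : ZMod pvN) = (x : ZMod pvN) := by
  rw [PySem.Int.mod_eq_emod_of_pos (by norm_num [pvMOD])]
  have h : pvMOD = ((pvN : Nat) : Int) := by norm_num [pvMOD, pvN]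
  rw [h]
  exact ZMod.intCast_mod x pvN

lemma pv_mul_entry (A B : List (List Int)) (i j : Fin 5) :
    pvEntryF (pvMul A B) i j =
      PySem.Int.mod (pvEntryF A i 0 * pvEntryF B 0 j +
        (pvEntryF A i 1 * pvEntryF B 1 j + (pvEntryF A i 2 * pvEntryF B 2 j +
        (pvEntryF A i 3 * pvEntryF B 3 j + (pvEntryF A i 4 * pvEntryF B 4 j + 0))))) pvMOD := by
  fin_cases i <;> fin_cases j <;> rfl

lemma pv_mul_correct (A B : List (List Int)) (A' B' : Matrix (Fin 5) (Fin 5) (ZMod pvN))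
    (hA : ∀ i j, ((pvEntryF A i j : Int) : ZMod pvN) = A' i j)
    (hB : ∀ i j, ((pvEntryF B i j : Int) : ZMod pvN) = B' i j) :
    ∀ i j, ((pvEntryF (pvMul A B) i j : Int) : ZMod pvN) = (A' * B') i j := by
  intro i j
  rw [pv_mul_entry, pv_cast_mod, Matrix.mul_apply, Fin.sum_univ_five]
  push_cast
  rw [hA i 0, hA i 1, hA i 2, hA i 3, hA i 4, hB 0 j, hB 1 j, hB 2 j, hB 3 j, hB 4 j]
  ring

lemma pv_mpow_succ (m : Nat) :
    pvMpow (m + 1) = pvMpowStep (pvMpow ((m + 1) / 2)) ((m + 1) % 2 == 1) := by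
  rw [pvMpow]

lemma pv_pow_correct : ∀ k, ∀ i j, ((pvEntryF (pvMpow k) i j : Int) : ZMod pvN) = (pvMz ^ k) i j := by
  intro k
  induction k using Nat.strong_induction_on with
  | _ k ih =>
    match k with
    | 0 =>
      intro i j
      fin_cases i <;> fin_cases j <;>
        simp [pvMpow, pvEntryF, pvEntry, pvId, pow_zero]
    | (m + 1) =>
      have h2 : (m + 1) / 2 < m + 1 := by omega
      have hH := ih _ h2
      have hT : ∀ i j, ((pvEntryF pvRows i j : Int) : ZMod pvN) = pvMz i j := fun i j => rfl
      intro i j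
      rcases Nat.even_or_odd (m + 1) with he | ho
      · have hm : ((m + 1) % 2 == 1) = false := by
          have := Nat.even_iff.mp he; simp [this]
        rw [pv_mpow_succ, hm]
        have hsum : (m + 1) / 2 + (m + 1) / 2 = m + 1 := by
          have := Nat.even_iff.mp he; omega
        rw [show pvMpowStep (pvMpow ((m+1)/2)) false = pvMul (pvMpow ((m+1)/2)) (pvMpow ((m+1)/2)) from rfl]
        rw [pv_mul_correct _ _ _ _ hH hH i j, ← pow_add, hsum]
      · have hm : ((m + 1) % 2 == 1) = true := by
          have := Nat.odd_iff.mp ho; simp [this]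
        rw [pv_mpow_succ, hm]
        have hsum : (m + 1) / 2 + (m + 1) / 2 + 1 = m + 1 := by
          have := Nat.odd_iff.mp ho; omega
        rw [show pvMpowStep (pvMpow ((m+1)/2)) true
            = pvMul (pvMul (pvMpow ((m+1)/2)) (pvMpow ((m+1)/2))) pvRows from rfl]
        rw [pv_mul_correct _ _ _ _ (pv_mul_correct _ _ _ _ hH hH) hT i j,
          ← pow_add, ← pow_succ, hsum]

-- the exact state vector after k steps: pvMz^k applied to the all-ones vector
def pvW (k : Nat) : Fin 5 → ZMod pvN := (pvMz ^ k).mulVec (fun _ => 1)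

def pvCast5 (s : Int × Int × Int × Int × Int) : Fin 5 → ZMod pvN :=
  ![((s.1 : Int) : ZMod pvN), (s.2.1 : ZMod pvN), (s.2.2.1 : ZMod pvN),
    (s.2.2.2.1 : ZMod pvN), (s.2.2.2.2 : ZMod pvN)]

lemma pv_iter_correct : ∀ k, ∀ i, pvCast5 (pvStep^[k] (1, 1, 1, 1, 1)) i = pvW k i := by
  intro k
  induction k with
  | zero =>
    intro i
    simp [pvW, pow_zero, Matrix.one_mulVec, pvCast5]
    fin_cases i <;> simp
  | succ k ih =>
    intro i
    rw [Function.iterate_succ_apply']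
    have hw : pvW (k + 1) = pvMz.mulVec (pvW k) := by
      rw [pvW, pvW, pow_succ', ← Matrix.mulVec_mulVec]
    rw [hw]
    rcases hs : pvStep^[k] (1, 1, 1, 1, 1) with ⟨a, e, ii, o, u⟩
    rw [hs] at ih
    have ha := ih 0; have he := ih 1; have hi := ih 2; have ho := ih 3; have hu := ih 4
    simp only [pvCast5, Matrix.cons_val_zero, Matrix.cons_val_one, Matrix.cons_val_two,
      Matrix.cons_val_three, Matrix.cons_val_four, Matrix.tail_cons, Matrix.head_cons] at ha he hi ho hu
    fin_cases i <;>
      simp [pvStep, pvCast5, pv_cast_mod, Matrix.mulVec, dotProduct, Fin.sum_univ_five,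
        pvMz, pvEntryF, pvEntry, pvRows, ← ha, ← he, ← hi, ← ho, ← hu]

lemma pv_foldl_iterate (l : List Int) (s : Int × Int × Int × Int × Int) :
    l.foldl (fun t _ => pvStep t) s = pvStep^[l.length] s := by
  induction l generalizing s with
  | nil => rfl
  | cons x xs ih => simp [List.foldl, ih, Function.iterate_succ_apply]

lemma pv_mod_congr (x y : Int) (h : (x : ZMod pvN) = (y : ZMod pvN)) :
    PySem.Int.mod x pvMOD = PySem.Int.mod y pvMOD := by
  rw [PySem.Int.mod_eq_emod_of_pos (by norm_num [pvMOD]),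
    PySem.Int.mod_eq_emod_of_pos (by norm_num [pvMOD])]
  have hmod : Int.ModEq ((pvN : Nat) : Int) x y := (ZMod.intCast_eq_intCast_iff x y pvN).mp h
  have hM : pvMOD = ((pvN : Nat) : Int) := by norm_num [pvMOD, pvN]
  rw [hM]
  exact hmod

lemma pv_w_sum (k : Nat) (i : Fin 5) : pvW k i = ∑ j, (pvMz ^ k) i j := by
  simp [pvW, Matrix.mulVec, dotProduct, mul_one]

lemma pv_sum_entries (P : List (List Int)) :
    ((List.range 5).map fun i => ((List.range 5).map fun j => pvEntry P i j).sum).sum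
      = ∑ i : Fin 5, ∑ j : Fin 5, pvEntryF P i j := by
  simp [List.range_succ, Fin.sum_univ_five, pvEntryF]
  ring

-- ===== VERDICT (by name: the statement is the Claim_ definition above) =====
theorem countPerms_spec : Claim_equal_countPerms := by
  intro n _
  unfold Spec_countPerms countPerms countPerms_alt
  rw [pv_foldl_iterate, PySem.List.length_pyRange_one]
  have hk : (n + 1 - 2).toNat = (n - 1).toNat := by omega
  rw [hk]
  set k := (n - 1).toNat with hkdef
  rcases hs : pvStep^[k] (1, 1, 1, 1, 1) with ⟨a, e, ii, o, u⟩
  have hit := pv_iter_correct k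
  rw [hs] at hit
  have ha := hit 0; have he := hit 1; have hi := hit 2; have ho := hit 3; have hu := hit 4
  simp only [pvCast5, Matrix.cons_val_zero, Matrix.cons_val_one, Matrix.cons_val_two,
    Matrix.cons_val_three, Matrix.cons_val_four, Matrix.tail_cons, Matrix.head_cons] at ha he hi ho hu
  apply pv_mod_congr
  rw [pv_sum_entries]
  push_cast
  rw [ha, he, hi, ho, hu]
  calc pvW k 0 + pvW k 1 + pvW k 2 + pvW k 3 + pvW k 4
      = ∑ i, pvW k i := by rw [Fin.sum_univ_five]
    _ = ∑ i, ∑ j, (pvMz ^ k) i j := Finset.sum_congr rfl fun i _ => pv_w_sum k i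
    _ = ∑ i, ∑ j, ((pvEntryF (pvMpow k) i j : Int) : ZMod pvN) := by
        exact Finset.sum_congr rfl fun i _ => Finset.sum_congr rfl fun j _ =>
          (pv_pow_correct k i j).symm
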